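-- pv_equiv track=rewrite | github.com/johnlx-33/projet-tutore | projet-V1.py | brute_force_hamming
-- ===== SOURCE A (Python) =====
-- def liste_nb_fact_premier(n):
--     ##int(n) renvoie la liste des facteurs premier composant n
--     l=[]
--     i=2
--     while(n!=1):
--         c=1
--         while(n%i==0):
--
--             n=n//i
--             c=c*i
--         if ((n*c)%i==0):
--             l=l+[c]
--         i=i+1
--     return l
--
-- def generateur_de_cas(n,k):
--     ## n>k renvoie 2 liste
--     ## liste des facteurs de n
--     ## liste de k mod facteur de n
--     ln = liste_nb_fact_premier(n)
--     lk = []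
--     for i in range(len(ln)):
--         lk = lk + [k%ln[i]]
--
--     return (ln,lk)
--
-- def dist_Hamming(l_reste1,l_reste2):
--     n=min(len(l_reste1),len(l_reste2))
--     m=max(len(l_reste1),len(l_reste2))
--     cpt=n
--     for i in range(n):
--         if (l_reste1[i]) == (l_reste2[i]):
--             cpt=cpt-1
--     return cpt
--
-- def brute_force_hamming(l_modulo,l_reste,nb_erreur):
--     n=len(l_reste)
--     cpt=0
--     N=1
--     borne=0
--     for i in range(n):
--         N=N*l_modulo[i]
--         borne=borne + (l_modulo[i]-1)
--     borne=N//borne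
--     (a,L_force)=generateur_de_cas(N,cpt)
--     l_candidat=[]
--     while cpt<=borne :
--         if( dist_Hamming(L_force,l_reste)<=nb_erreur):
--             l_candidat=l_candidat+[cpt]
--         cpt=cpt+1
--         (a,L_force)=generateur_de_cas(N,cpt)
--
--     return l_candidat
-- ===== SOURCE B (Python) =====
-- def _prime_power_factors(n):
--     # trial division: maximal prime-power factors of n, increasing primes
--     l = []
--     i = 2
--     while n != 1:
--         c = 1
--         while n % i == 0:
--             n //= i
--             c *= i
--         if (n * c) % i == 0:
--             l.append(c)
--         i += 1
--     return l
--
-- def brute_force_hamming(l_modulo, l_reste, nb_erreur):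
--     n = len(l_reste)
--     N = 1
--     s = 0
--     for i in range(n):
--         N *= l_modulo[i]
--         s += l_modulo[i] - 1
--     borne = N // s
--     facs = _prime_power_factors(N)          # factor N once
--     k = min(len(facs), n)
--     size = max(borne + 1, 0)
--     # additive sieve: for each factor, the candidates matching l_reste[j] mod facs[j]
--     # form an arithmetic progression; mark them all at once instead of testing each cpt
--     matches = [0] * size
--     for j in range(k):
--         f = facs[j]
--         r = l_reste[j]
--         if 0 <= r < f:
--             pos = r
--             while pos <= borne:
--                 matches[pos] += 1
--                 pos += f
--     return [cpt for cpt in range(size) if k - matches[cpt] <= nb_erreur]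
-- ===== Notes on version B (the rewrite author's own statement) =====
-- stated objective: alternative
-- what changed: A re-factorises N into prime-power factors for every candidate cpt and compares the resulting residue list positionally; B factors N once and replaces the per-candidate residue comparison by an additive sieve: for each factor it marks the arithmetic progression of candidates whose residue matches l_reste[j] in a count array, then keeps the candidates with at least k-nb_erreur marks. The enumeration of borne+1 candidates dominates both on the timed inputs, so no speed-up was measured.
import Mathlib
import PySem

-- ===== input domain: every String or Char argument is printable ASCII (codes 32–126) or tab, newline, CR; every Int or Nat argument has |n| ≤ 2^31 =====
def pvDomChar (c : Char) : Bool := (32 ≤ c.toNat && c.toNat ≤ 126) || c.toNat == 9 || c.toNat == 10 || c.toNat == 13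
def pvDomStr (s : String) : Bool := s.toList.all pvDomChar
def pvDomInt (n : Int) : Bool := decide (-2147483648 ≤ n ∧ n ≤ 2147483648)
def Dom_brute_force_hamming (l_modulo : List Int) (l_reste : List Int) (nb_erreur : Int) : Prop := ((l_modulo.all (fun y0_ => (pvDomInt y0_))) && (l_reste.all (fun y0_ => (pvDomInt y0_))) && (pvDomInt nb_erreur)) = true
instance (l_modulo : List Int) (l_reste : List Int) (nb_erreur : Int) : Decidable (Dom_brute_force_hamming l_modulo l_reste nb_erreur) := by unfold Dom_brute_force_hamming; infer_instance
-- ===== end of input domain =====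

-- B factors N once and replaces A's per-candidate refactorisation + residue comparison by an
-- additive sieve over a count array (mark each matching arithmetic progression once).

-- ===== PORT A =====
-- inner 'while n % i == 0' of liste_nb_fact_premier; fuel n.natAbs is enough for n ≥ 1
def pyFactInner : Nat → Int → Int → Int → Int × Int
  | 0, n, _, c => (n, c)
  | fuel+1, n, i, c =>
    if PySem.Int.mod n i = 0 then pyFactInner fuel (PySem.Int.floordiv n i) i (c * i) else (n, c)

-- outer 'while n != 1' of liste_nb_fact_premier; fuel n.natAbs is enough for n ≥ 1
def pyFactOuter : Nat → Int → Int → List Int → List Int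
  | 0, _, _, l => l
  | fuel+1, n, i, l =>
    if n ≠ 1 then
      let r := pyFactInner n.natAbs n i 1
      let l' := if PySem.Int.mod (r.1 * r.2) i = 0 then l ++ [r.2] else l
      pyFactOuter fuel r.1 (i + 1) l'
    else l

def liste_nb_fact_premier (n : Int) : List Int := pyFactOuter n.natAbs n 2 []

def generateur_de_cas (n k : Int) : List Int × List Int :=
  let ln := liste_nb_fact_premier n
  let lk := (List.range ln.length).foldl (fun lk i => lk ++ [PySem.Int.mod k (ln.getD i 0)]) []
  (ln, lk)

def dist_Hamming (l_reste1 l_reste2 : List Int) : Int :=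
  let n := min l_reste1.length l_reste2.length
  (List.range n).foldl (fun cpt i => if l_reste1.getD i 0 = l_reste2.getD i 0 then cpt - 1 else cpt) (n : Int)

-- the 'while cpt <= borne' loop; fuel (borne+1-cpt).toNat is exact
def bfLoop (l_reste : List Int) (nb_erreur N borne : Int) :
    Nat → Int → List Int × List Int → List Int → List Int
  | 0, _, _, acc => acc
  | fuel+1, cpt, aL, acc =>
    if cpt ≤ borne then
      let acc' := if dist_Hamming aL.2 l_reste ≤ nb_erreur then acc ++ [cpt] else acc
      bfLoop l_reste nb_erreur N borne fuel (cpt + 1) (generateur_de_cas N (cpt + 1)) acc'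
    else acc

def brute_force_hamming (l_modulo : List Int) (l_reste : List Int) (nb_erreur : Int) : List Int :=
  let n := l_reste.length
  let st := (List.range n).foldl
    (fun (st : Int × Int) i => (st.1 * l_modulo.getD i 0, st.2 + (l_modulo.getD i 0 - 1))) (1, 0)
  let borne := PySem.Int.floordiv st.1 st.2
  bfLoop l_reste nb_erreur st.1 borne (borne + 1).toNat 0 (generateur_de_cas st.1 0) []

-- ===== PORT B =====
-- Source B's inner 'while pos <= borne: matches[pos] += 1; pos += f'; fuel (borne+1-pos).toNat is enough for f ≥ 1
def markLoop (borne f : Int) : Nat → Int → List Int → List Int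
  | 0, _, m => m
  | fuel+1, pos, m =>
    if pos ≤ borne then
      markLoop borne f fuel (pos + f) (m.set pos.toNat (m.getD pos.toNat 0 + 1))
    else m

-- Source B's body of 'for j in range(k)': guard the residue, then mark its progression
def sieveStep (facs lr : List Int) (borne : Int) (m : List Int) (j : Nat) : List Int :=
  let f := facs.getD j 0
  let r := lr.getD j 0
  if 0 ≤ r ∧ r < f then markLoop borne f (borne + 1 - r).toNat r m else m

def brute_force_hamming_alt (l_modulo : List Int) (l_reste : List Int) (nb_erreur : Int) : List Int :=
  let n := l_reste.length
  let st := (List.range n).foldl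
    (fun (st : Int × Int) i => (st.1 * l_modulo.getD i 0, st.2 + (l_modulo.getD i 0 - 1))) (1, 0)
  let borne := PySem.Int.floordiv st.1 st.2
  let facs := liste_nb_fact_premier st.1          -- factor N once
  let k := min facs.length n
  let size := (max (borne + 1) 0).toNat
  let marks := (List.range k).foldl (sieveStep facs l_reste borne) (List.replicate size 0)
  (PySem.List.pyRange 0 (borne + 1) 1).filter
    (fun cpt => decide ((k : Int) - marks.getD cpt.toNat 0 ≤ nb_erreur))

-- ===== PRECONDITION & SPEC =====
-- Pre_ excludes exactly the inputs where Python A does not return: l_modulo shorter than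
-- l_reste (IndexError), product ≤ 0 (the factorisation loop diverges), sum of (m-1) = 0
-- (ZeroDivisionError on N // borne).
def Pre_brute_force_hamming (l_modulo : List Int) (l_reste : List Int) (nb_erreur : Int) : Prop :=
  l_reste.length ≤ l_modulo.length ∧
  1 ≤ (l_modulo.take l_reste.length).prod ∧
  ((l_modulo.take l_reste.length).map (fun m => m - 1)).sum ≠ 0
instance (l_modulo : List Int) (l_reste : List Int) (nb_erreur : Int) : Decidable (Pre_brute_force_hamming l_modulo l_reste nb_erreur) := by unfold Pre_brute_force_hamming; infer_instance

def pvWitness_brute_force_hamming : List Int × List Int × Int := ([3, 5], [1, 2], 1)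

def Spec_brute_force_hamming (l_modulo : List Int) (l_reste : List Int) (nb_erreur : Int) (out : List Int) : Prop := out = brute_force_hamming_alt l_modulo l_reste nb_erreur
instance (l_modulo : List Int) (l_reste : List Int) (nb_erreur : Int) (out : List Int) : Decidable (Spec_brute_force_hamming l_modulo l_reste nb_erreur out) := by unfold Spec_brute_force_hamming; infer_instance

-- ===== CLAIM (what is proved, stated in full; the proofs are below) =====
def Claim_equal_brute_force_hamming : Prop := ∀ (l_modulo : List Int) (l_reste : List Int) (nb_erreur : Int), Dom_brute_force_hamming l_modulo l_reste nb_erreur → Pre_brute_force_hamming l_modulo l_reste nb_erreur → Spec_brute_force_hamming l_modulo l_reste nb_erreur (brute_force_hamming l_modulo l_reste nb_erreur)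

-- ===== LEMMAS AND PROOFS =====

-- the decrement-if fold of dist_Hamming counts matching positions down from the start value
lemma foldl_sub_if (p : Nat → Prop) [DecidablePred p] (m : Nat) (c : Int) :
    (List.range m).foldl (fun cpt i => if p i then cpt - 1 else cpt) c
      = c - ((List.range m).countP (fun i => decide (p i)) : Int) := by
  induction m generalizing c with
  | zero => simp
  | succ m ih =>
      rw [List.range_succ, List.foldl_append, List.countP_append, ih]
      by_cases h : p m
      · simp [h]
        ring
      · simp [h]

-- positions below m split into matches and mismatches
lemma count_ne_add_count_eq (l1 l2 : List Int) (m : Nat) :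
    (List.range m).countP (fun i => decide (l1.getD i 0 ≠ l2.getD i 0))
      + (List.range m).countP (fun i => decide (l1.getD i 0 = l2.getD i 0)) = m := by
  induction m with
  | zero => simp
  | succ m ih =>
      by_cases h : l1[m]?.getD 0 = l2[m]?.getD 0 <;>
        simp [List.range_succ, List.getD_eq_getElem?_getD, h] at ih ⊢ <;> omega

-- dist_Hamming is the number of mismatching positions below min of the lengths
lemma dist_Hamming_eq_count (l1 l2 : List Int) :
    dist_Hamming l1 l2
      = ((List.range (min l1.length l2.length)).countP
          (fun i => decide (l1.getD i 0 ≠ l2.getD i 0)) : Int) := by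
  show (List.range (min l1.length l2.length)).foldl
      (fun cpt i => if l1.getD i 0 = l2.getD i 0 then cpt - 1 else cpt)
      ((min l1.length l2.length : Nat) : Int) = _
  rw [foldl_sub_if (fun i => l1.getD i 0 = l2.getD i 0)]
  have h := count_ne_add_count_eq l1 l2 (min l1.length l2.length)
  omega

-- the second component of generateur_de_cas is the residue list of k
lemma generateur_snd (n k : Int) :
    (generateur_de_cas n k).2
      = (List.range (liste_nb_fact_premier n).length).map
          (fun i => PySem.Int.mod k ((liste_nb_fact_premier n).getD i 0)) := by
  show (List.range (liste_nb_fact_premier n).length).foldl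
      (fun lk i => lk ++ [PySem.Int.mod k ((liste_nb_fact_premier n).getD i 0)]) [] = _
  simpa using PySem.List.foldl_append_singleton_eq_map
    (fun i => PySem.Int.mod k ((liste_nb_fact_premier n).getD i 0))
    (List.range (liste_nb_fact_premier n).length) []

-- A's per-candidate mismatch count, written as a countP over the factor indices
lemma distA_eq (N c : Int) (lr : List Int) :
    dist_Hamming (generateur_de_cas N c).2 lr
      = ((List.range (min (liste_nb_fact_premier N).length lr.length)).countP
          (fun j => decide (PySem.Int.mod c ((liste_nb_fact_premier N).getD j 0) ≠ lr.getD j 0)) : Int) := by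
  have hsnd := generateur_snd N c
  have hlen : (generateur_de_cas N c).2.length = (liste_nb_fact_premier N).length := by
    rw [hsnd]; simp
  rw [dist_Hamming_eq_count, hlen]
  congr 1
  apply List.countP_congr
  intro i hi
  have hik : i < min (liste_nb_fact_premier N).length lr.length := by
    simpa using List.mem_range.mp hi
  have hif : i < (liste_nb_fact_premier N).length := lt_of_lt_of_le hik (Nat.min_le_left _ _)
  have hget : (generateur_de_cas N c).2.getD i 0
      = PySem.Int.mod c ((liste_nb_fact_premier N).getD i 0) := by
    rw [hsnd, List.getD_eq_getElem?_getD]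
    simp [hif]
  simp only [← List.getD_eq_getElem?_getD] at *
  rw [hget]

-- pyRange with step 1 is empty when the bound is not above the start
lemma pyRange_one_nil (a b : Int) (h : b ≤ a) : PySem.List.pyRange a b 1 = [] := by
  cases hx : PySem.List.pyRange a b 1 with
  | nil => rfl
  | cons y ys =>
      exfalso
      have : y ∈ PySem.List.pyRange a b 1 := by rw [hx]; exact List.mem_cons_self
      have := (PySem.List.mem_pyRange_one (a := a) (b := b) (x := y)).mp this
      omega

-- A's while-loop is a filter over range(borne+1), started at cpt
lemma bfLoop_eq_filter (l_reste : List Int) (nb_erreur N borne : Int) :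
    ∀ (fuel : Nat) (cpt : Int) (acc : List Int), fuel = (borne + 1 - cpt).toNat →
    bfLoop l_reste nb_erreur N borne fuel cpt (generateur_de_cas N cpt) acc
      = acc ++ (PySem.List.pyRange cpt (borne + 1) 1).filter
          (fun c => decide (dist_Hamming (generateur_de_cas N c).2 l_reste ≤ nb_erreur)) := by
  intro fuel
  induction fuel with
  | zero =>
      intro cpt acc h
      have hcb : borne + 1 ≤ cpt := by omega
      rw [pyRange_one_nil _ _ hcb]
      simp [bfLoop]
  | succ fuel ih =>
      intro cpt acc h
      have hcb : cpt ≤ borne := by omega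
      rw [PySem.List.pyRange_one_cons (by omega)]
      simp only [bfLoop, if_pos hcb, List.filter_cons]
      rw [ih (cpt + 1) _ (by omega)]
      by_cases hd : dist_Hamming (generateur_de_cas N cpt).2 l_reste ≤ nb_erreur
      · simp [hd]
      · simp [hd]

-- first component of A's and B's shared accumulator fold is the running product
lemma foldl_prod_fst (g : Nat → Int) (n : Nat) (a b : Int) :
    ((List.range n).foldl (fun (st : Int × Int) i => (st.1 * g i, st.2 + (g i - 1))) (a, b)).1
      = a * ((List.range n).map g).prod := by
  induction n generalizing a b with
  | zero => simp
  | succ n ih =>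
      rw [List.range_succ, List.foldl_append, List.map_append]
      simp only [List.foldl_cons, List.foldl_nil, List.map_cons, List.map_nil,
        List.prod_append, List.prod_cons, List.prod_nil]
      rcases hst : (List.range n).foldl
          (fun (st : Int × Int) i => (st.1 * g i, st.2 + (g i - 1))) (a, b) with ⟨x, y⟩
      have := ih a b
      rw [hst] at this
      simp at this ⊢
      rw [this]; ring

lemma prod_map_getD_range (l : List Int) (n : Nat) (h : n ≤ l.length) :
    ((List.range n).map (fun i => l.getD i 0)).prod = (l.take n).prod := by
  induction n with
  | zero => simp
  | succ n ih =>
      have hn : n < l.length := by omega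
      rw [List.range_succ, List.map_append, List.prod_append,
        ih (by omega), List.take_succ]
      simp [List.getD_eq_getElem?_getD, hn, List.getElem?_eq_getElem hn]

-- x % f = 0 in the open window (-f, f) forces x = 0
lemma emod_eq_zero_iff_small (x f : Int) (hf : 0 < f) (h1 : -f < x) (h2 : x < f) :
    x % f = 0 ↔ x = 0 := by
  constructor
  · intro h
    by_cases hx : 0 ≤ x
    · rw [Int.emod_eq_of_lt hx h2] at h; exact h
    · exfalso
      have hx' : x % f = x + f := by
        have := Int.add_mul_emod_self_left (a := x) (b := f) (c := 1)
        rw [mul_one] at this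
        rw [← this, Int.emod_eq_of_lt (by omega) (by omega)]
      omega
  · intro h; simp [h]

-- matching a residue r with 0 ≤ r < f is the same as lying on the progression r, r+f, …
lemma match_iff (c r f : Int) (hc : 0 ≤ c) (hr : 0 ≤ r) (hrf : r < f) :
    (r ≤ c ∧ (c - r) % f = 0) ↔ c % f = r := by
  have hf : 0 < f := by omega
  have hcf0 : 0 ≤ c % f := Int.emod_nonneg c (by omega)
  have hcf1 : c % f < f := Int.emod_lt_of_pos c hf
  have hsub : (c - r) % f = (c % f - r) % f := by
    conv_lhs => rw [Int.sub_emod]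
    rw [Int.emod_eq_of_lt hr hrf]
  constructor
  · rintro ⟨-, h⟩
    rw [hsub] at h
    have := (emod_eq_zero_iff_small (c % f - r) f hf (by omega) (by omega)).mp h
    omega
  · intro h
    have hrc : r ≤ c := by
      by_contra hlt
      push_neg at hlt
      rw [Int.emod_eq_of_lt hc (by omega)] at h
      omega
    refine ⟨hrc, ?_⟩
    rw [hsub, h]
    simp

-- markLoop increments exactly the in-range entries on the progression pos, pos+f, …
lemma markLoop_spec (borne f : Int) (hf : 1 ≤ f) :
    ∀ (fuel : Nat) (pos : Int) (m : List Int) (c : Nat),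
      (borne + 1 - pos).toNat ≤ fuel → 0 ≤ pos →
      (markLoop borne f fuel pos m).length = m.length ∧
      (markLoop borne f fuel pos m).getD c 0
        = m.getD c 0 +
          (if pos ≤ (c : Int) ∧ (c : Int) ≤ borne ∧ c < m.length ∧ ((c : Int) - pos) % f = 0
           then 1 else 0) := by
  intro fuel
  induction fuel with
  | zero =>
      intro pos m c hfuel hpos
      have hnb : borne < pos := by omega
      have hneg : ¬ (pos ≤ (c : Int) ∧ (c : Int) ≤ borne ∧ c < m.length ∧ ((c : Int) - pos) % f = 0) := by
        rintro ⟨h1, h2, -, -⟩; omega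
      simp only [markLoop]
      rw [if_neg hneg]
      exact ⟨by trivial, by ring⟩
  | succ fuel ih =>
      intro pos m c hfuel hpos
      by_cases hpb : pos ≤ borne
      · simp only [markLoop, if_pos hpb]
        set m' := m.set pos.toNat (m.getD pos.toNat 0 + 1) with hm'
        have hlen' : m'.length = m.length := by simp [hm']
        obtain ⟨ihlen, ihget⟩ := ih (pos + f) m' c (by omega) (by omega)
        refine ⟨by rw [ihlen, hlen'], ?_⟩
        rw [ihget, hlen']
        have hemod : ((c : Int) - (pos + f)) % f = ((c : Int) - pos) % f := by
          have := Int.sub_emod_right ((c : Int) - pos) f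
          rw [← this]; ring_nf
        by_cases hcp : (c : Int) = pos
        · -- the entry being set
          have hcn : c = pos.toNat := by omega
          have hind2 : ¬ (pos + f ≤ (c : Int) ∧ (c : Int) ≤ borne ∧ c < m.length ∧ ((c : Int) - (pos + f)) % f = 0) := by
            rintro ⟨h1, -, -, -⟩; omega
          rw [if_neg hind2]
          by_cases hcl : c < m.length
          · have hget' : m'.getD c 0 = m.getD c 0 + 1 := by
              rw [hm', hcn]
              simp [List.getD_eq_getElem?_getD,
                List.getElem?_set_self (by omega : pos.toNat < m.length)]
            have hind : (pos ≤ (c : Int) ∧ (c : Int) ≤ borne ∧ c < m.length ∧ ((c : Int) - pos) % f = 0) := by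
              refine ⟨by omega, by omega, hcl, ?_⟩
              rw [hcp]; simp
            rw [hget', if_pos hind] <;> ring
          · have hset : m' = m := by
              rw [hm']; exact List.set_eq_of_length_le (by omega)
            have hind : ¬ (pos ≤ (c : Int) ∧ (c : Int) ≤ borne ∧ c < m.length ∧ ((c : Int) - pos) % f = 0) := by
              rintro ⟨-, -, h3, -⟩; omega
            rw [hset, if_neg hind] <;> ring
        · -- a different entry: set does not change it
          have hget' : m'.getD c 0 = m.getD c 0 := by
            rw [hm']
            simp [List.getD_eq_getElem?_getD, List.getElem?_set_ne (by omega : pos.toNat ≠ c)]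
          rw [hget', hemod]
          congr 1
          by_cases he : ((c : Int) - pos) % f = 0
          · by_cases hge : pos + f ≤ (c : Int)
            · have h1 : (pos ≤ (c:Int)) := by omega
              simp only [he, hge, h1, true_and, and_true]
            · -- e = 0 with pos < c < pos + f is impossible
              have hneg1 : ¬ (pos + f ≤ (c : Int) ∧ (c : Int) ≤ borne ∧ c < m.length ∧ ((c : Int) - pos) % f = 0) := by
                rintro ⟨h1, -, -, -⟩; omega
              have hneg2 : ¬ (pos ≤ (c : Int) ∧ (c : Int) ≤ borne ∧ c < m.length ∧ ((c : Int) - pos) % f = 0) := by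
                rintro ⟨h1, -, -, h4⟩
                have hx := (emod_eq_zero_iff_small ((c : Int) - pos) f (by omega) (by omega) (by omega)).mp h4
                omega
              rw [if_neg hneg1, if_neg hneg2]
          · have hneg1 : ¬ (pos + f ≤ (c : Int) ∧ (c : Int) ≤ borne ∧ c < m.length ∧ ((c : Int) - pos) % f = 0) := by
              rintro ⟨-, -, -, h4⟩; exact he h4
            have hneg2 : ¬ (pos ≤ (c : Int) ∧ (c : Int) ≤ borne ∧ c < m.length ∧ ((c : Int) - pos) % f = 0) := by
              rintro ⟨-, -, -, h4⟩; exact he h4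
            rw [if_neg hneg1, if_neg hneg2]
      · have hneg : ¬ (pos ≤ (c : Int) ∧ (c : Int) ≤ borne ∧ c < m.length ∧ ((c : Int) - pos) % f = 0) := by
          rintro ⟨h1, h2, -, -⟩; omega
        simp only [markLoop, if_neg hpb]
        rw [if_neg hneg]
        exact ⟨by trivial, by ring⟩

-- the sieve entry at c counts the factor indices whose residue c matches (with the guard)
lemma sieve_spec (facs lr : List Int) (borne : Int) :
    ∀ (js : List Nat) (m : List Int) (c : Nat), (c : Int) ≤ borne → c < m.length →
      (js.foldl (sieveStep facs lr borne) m).length = m.length ∧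
      (js.foldl (sieveStep facs lr borne) m).getD c 0
        = m.getD c 0 +
          (js.countP (fun j => decide (0 ≤ lr.getD j 0 ∧ lr.getD j 0 < facs.getD j 0 ∧
              PySem.Int.mod (c : Int) (facs.getD j 0) = lr.getD j 0)) : Int) := by
  intro js
  induction js with
  | nil => intro m c _ _; simp
  | cons j js ih =>
      intro m c hcb hcm
      simp only [List.foldl_cons, List.countP_cons, decide_eq_true_eq]
      by_cases hg : 0 ≤ lr.getD j 0 ∧ lr.getD j 0 < facs.getD j 0
      · have hf1 : 1 ≤ facs.getD j 0 := by omega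
        obtain ⟨mlen, mget⟩ := markLoop_spec borne (facs.getD j 0) hf1
          (borne + 1 - lr.getD j 0).toNat (lr.getD j 0) m c (by omega) hg.1
        have hstep : sieveStep facs lr borne m j
            = markLoop borne (facs.getD j 0) (borne + 1 - lr.getD j 0).toNat (lr.getD j 0) m := by
          simp only [sieveStep]
          rw [if_pos hg]
        obtain ⟨ilen, iget⟩ := ih (sieveStep facs lr borne m j) c hcb
          (by rw [hstep, mlen]; exact hcm)
        refine ⟨by rw [ilen, hstep, mlen], ?_⟩
        rw [iget, hstep, mget]
        have hmi : (lr.getD j 0 ≤ (c : Int) ∧ ((c : Int) - lr.getD j 0) % facs.getD j 0 = 0)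
            ↔ PySem.Int.mod (c : Int) (facs.getD j 0) = lr.getD j 0 := by
          rw [PySem.Int.mod_eq_emod_of_pos (by omega)]
          exact match_iff _ _ _ (by positivity) hg.1 hg.2
        by_cases hm : PySem.Int.mod (c : Int) (facs.getD j 0) = lr.getD j 0
        · have h2 := hmi.mpr hm
          rw [if_pos ⟨h2.1, hcb, hcm, h2.2⟩, if_pos ⟨hg.1, hg.2, hm⟩]
          push_cast
          ring
        · rw [if_neg (fun h => hm (hmi.mp ⟨h.1, h.2.2.2⟩)),
            if_neg (fun h => hm h.2.2)]
          push_cast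
          ring
      · have hstep : sieveStep facs lr borne m j = m := by
          simp only [sieveStep]
          rw [if_neg hg]
        rw [hstep]
        obtain ⟨ilen, iget⟩ := ih m c hcb hcm
        refine ⟨ilen, ?_⟩
        rw [iget, if_neg (fun h => hg ⟨h.1, h.2.1⟩)]
        push_cast
        ring

lemma pyFactInner_spec :
    ∀ (fuel : Nat) (n i c : Int), n.natAbs ≤ fuel → 1 ≤ n → 2 ≤ i → 1 ≤ c →
      1 ≤ (pyFactInner fuel n i c).1 ∧
      PySem.Int.mod (pyFactInner fuel n i c).1 i ≠ 0 ∧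
      ((pyFactInner fuel n i c).2 = c ∨ i ≤ (pyFactInner fuel n i c).2) := by
  intro fuel
  induction fuel with
  | zero => intro n i c hfuel hn hi hc; omega
  | succ fuel ih =>
      intro n i c hfuel hn hi hc
      by_cases h : PySem.Int.mod n i = 0
      · have hdvd : i ∣ n := (PySem.Int.mod_eq_zero_iff_dvd n i).mp h
        obtain ⟨t, ht⟩ := hdvd
        have ht1 : 1 ≤ t := by nlinarith
        have hdiv : PySem.Int.floordiv n i = t := by
          rw [PySem.Int.floordiv_eq_ediv_of_pos (by omega), ht,
            Int.mul_ediv_cancel_left t (by omega)]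
        have htn : t.natAbs ≤ fuel := by
          have : t + 1 ≤ n := by nlinarith
          omega
        have hrec := ih t i (c * i) htn ht1 hi (by nlinarith)
        simp only [pyFactInner, if_pos h, hdiv]
        refine ⟨hrec.1, hrec.2.1, Or.inr ?_⟩
        rcases hrec.2.2 with h2 | h2
        · rw [h2]; nlinarith
        · exact h2
      · simp only [pyFactInner, if_neg h]
        exact ⟨hn, h, Or.inl (by trivial)⟩

-- every factor appended by the outer loop is ≥ 2
lemma pyFactOuter_mem :
    ∀ (fuel : Nat) (n i : Int) (l : List Int), 1 ≤ n → 2 ≤ i → (∀ x ∈ l, 2 ≤ x) →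
      ∀ x ∈ pyFactOuter fuel n i l, 2 ≤ x := by
  intro fuel
  induction fuel with
  | zero => intro n i l _ _ hl x hx; exact hl x hx
  | succ fuel ih =>
      intro n i l hn hi hl x hx
      by_cases hone : n = 1
      · simp only [pyFactOuter, hone] at hx
        simp at hx
        exact hl x hx
      · have hspec := pyFactInner_spec n.natAbs n i 1 (le_refl _) hn hi (by omega)
        simp only [pyFactOuter, if_pos (by exact hone : n ≠ 1)] at hx
        refine ih (pyFactInner n.natAbs n i 1).1 (i + 1) _ hspec.1 (by omega) ?_ x hx
        intro y hy
        by_cases happ : PySem.Int.mod ((pyFactInner n.natAbs n i 1).1 * (pyFactInner n.natAbs n i 1).2) i = 0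
        · rw [if_pos happ] at hy
          rcases List.mem_append.mp hy with hy | hy
          · exact hl y hy
          · have hy2 : y = (pyFactInner n.natAbs n i 1).2 := by simpa using hy
            rcases hspec.2.2 with hc | hc
            · exfalso
              rw [hc, mul_one] at happ
              exact hspec.2.1 happ
            · omega
        · rw [if_neg happ] at hy
          exact hl y hy

lemma factors_ge_two (N : Int) (hN : 1 ≤ N) : ∀ x ∈ liste_nb_fact_premier N, 2 ≤ x :=
  pyFactOuter_mem N.natAbs N 2 [] hN (le_refl 2) (by simp)


-- matches and mismatches over the first K indices are complementary
lemma count_split (facs lr : List Int) (c : Int) (K : Nat) :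
    (List.range K).countP (fun j => decide (PySem.Int.mod c (facs.getD j 0) ≠ lr.getD j 0))
      + (List.range K).countP (fun j => decide (PySem.Int.mod c (facs.getD j 0) = lr.getD j 0)) = K := by
  induction K with
  | zero => simp
  | succ K ihK =>
      by_cases h : PySem.Int.mod c (facs[K]?.getD 0) = lr[K]?.getD 0 <;>
        simp [List.range_succ, List.getD_eq_getElem?_getD, h] at ihK ⊢ <;> omega

-- B's per-candidate test equals A's, once the sieve entry is expanded
lemma pointwise_eq (N borne nb : Int) (lr : List Int) (c : Int)
    (hN : 1 ≤ N) (hc0 : 0 ≤ c) (hcb : c ≤ borne) :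
    decide (dist_Hamming (generateur_de_cas N c).2 lr ≤ nb)
      = decide (((min (liste_nb_fact_premier N).length lr.length : Nat) : Int)
          - ((List.range (min (liste_nb_fact_premier N).length lr.length)).foldl
              (sieveStep (liste_nb_fact_premier N) lr borne)
              (List.replicate (max (borne + 1) 0).toNat 0)).getD c.toNat 0 ≤ nb) := by
  set facs := liste_nb_fact_premier N with hfacs
  set K := min facs.length lr.length with hK
  set size := (max (borne + 1) 0).toNat with hsize
  have hcnat : ((c.toNat : Nat) : Int) = c := Int.toNat_of_nonneg hc0
  have hclen : c.toNat < (List.replicate size (0 : Int)).length := by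
    simp [hsize]; omega
  obtain ⟨-, hget⟩ := sieve_spec facs lr borne (List.range K)
    (List.replicate size 0) c.toNat (by omega) hclen
  rw [hget]
  have hrep : (List.replicate size (0 : Int)).getD c.toNat 0 = 0 := by
    rw [List.getD_eq_getElem?_getD, List.getElem?_replicate]
    split <;> rfl
  rw [hrep, zero_add]
  -- the guarded match count equals the plain match count over range K
  have hcong : (List.range K).countP (fun j => decide (0 ≤ lr.getD j 0 ∧
        lr.getD j 0 < facs.getD j 0 ∧
        PySem.Int.mod ((c.toNat : Nat) : Int) (facs.getD j 0) = lr.getD j 0))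
      = (List.range K).countP (fun j =>
        decide (PySem.Int.mod c (facs.getD j 0) = lr.getD j 0)) := by
    apply List.countP_congr
    intro j hj
    have hjK : j < K := List.mem_range.mp hj
    have hjf : j < facs.length := lt_of_lt_of_le hjK (Nat.min_le_left _ _)
    have hfm : facs.getD j 0 ∈ facs := by
      rw [List.getD_eq_getElem?_getD, List.getElem?_eq_getElem hjf]
      exact List.getElem_mem hjf
    have hf2 : 2 ≤ facs.getD j 0 := factors_ge_two N hN _ hfm
    rw [hcnat]
    simp only [decide_eq_true_eq]
    by_cases hm : PySem.Int.mod c (facs.getD j 0) = lr.getD j 0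
    · have h0 : 0 ≤ lr.getD j 0 := hm ▸ PySem.Int.mod_nonneg c (by omega)
      have h1 : lr.getD j 0 < facs.getD j 0 := hm ▸ PySem.Int.mod_lt c (by omega)
      exact ⟨fun h => h.2.2, fun h => ⟨h0, h1, h⟩⟩
    · exact ⟨fun h => h.2.2, fun h => absurd h hm⟩
  rw [hcong]
  -- complement counting: mismatches = K - matches
  have hsplit := count_split facs lr c K
  have hdist := distA_eq N c lr
  rw [← hfacs] at hdist
  rw [hdist, ← hK]
  simp only [decide_eq_decide]
  omega

-- ===== VERDICT (by name: the statement is the Claim_ definition above) =====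
theorem brute_force_hamming_spec : Claim_equal_brute_force_hamming := by
  intro l_modulo l_reste nb_erreur _ hpre
  obtain ⟨hlen, hprod, -⟩ := hpre
  unfold Spec_brute_force_hamming brute_force_hamming brute_force_hamming_alt
  rw [bfLoop_eq_filter _ _ _ _ _ 0 [] (by omega)]
  rw [List.nil_append]
  have hN1 : 1 ≤ ((List.range l_reste.length).foldl
      (fun (st : Int × Int) i => (st.1 * l_modulo.getD i 0, st.2 + (l_modulo.getD i 0 - 1)))
      (1, 0)).1 := by
    rw [foldl_prod_fst, one_mul, prod_map_getD_range _ _ hlen]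
    exact hprod
  apply List.filter_congr
  intro c hc
  have hcr := (PySem.List.mem_pyRange_one).mp hc
  exact pointwise_eq _ _ _ _ _ hN1 hcr.1 (by omega)
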